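-- pv_equiv track=rewrite | github.com/JHoooooon/getting_start_python_codingtest | email_addresses/main.py | remove_plus_sign
-- ===== SOURCE A (Python) =====
-- def remove_plus_sign(emails: list[str]) -> list:
--     """
--     이메일에서 + 와 @ 사이에 있는 문자열을 무시하는 함수
--
--     Parmas:
--         emails (list): 이메일 리스트
--     Returns:
--         list: + 와 @ 사이의 문자열을 무시한 이메일 리스트
--     """
--     new_emails = []
--
--     for email in emails:
--         plus_idx = email.find('+')
--         at_idx = email.find('@')
--
--         if (plus_idx != -1 and at_idx > plus_idx):
--             new_email = email[0:plus_idx] + email[at_idx:]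
--             new_emails.append(new_email)
--         else:
--             new_emails.append(email)
--
--     return new_emails
-- ===== SOURCE B (Python) =====
-- def remove_plus_sign(emails: list[str]) -> list:
--     # Three-state character automaton per email:
--     # state 0: copying, no '+' seen yet; state 1: skipping chars after a '+';
--     # state 2: an '@' terminated the strip (or appeared first), copy verbatim.
--     new_emails = []
--     for email in emails:
--         acc = []
--         state = 0
--         for ch in email:
--             if state == 0:
--                 if ch == '+':
--                     state = 1
--                 elif ch == '@':
--                     state = 2
--                     acc.append(ch)
--                 else:
--                     acc.append(ch)
--             elif state == 1:
--                 if ch == '@':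
--                     state = 2
--                     acc.append(ch)
--             else:
--                 acc.append(ch)
--         # ended mid-skip: no '@' after the '+', keep the original email
--         new_emails.append(email if state == 1 else ''.join(acc))
--     return new_emails
-- ===== Notes on version B (the rewrite author's own statement) =====
-- stated objective: alternative
-- what changed: B replaces A's two find()-index computations and slicing with a single-pass three-state character automaton (copy / skip-after-plus / copy-after-at) that builds the output characters directly, falling back to the original email only when the scan ends mid-skip.
import Mathlib
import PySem

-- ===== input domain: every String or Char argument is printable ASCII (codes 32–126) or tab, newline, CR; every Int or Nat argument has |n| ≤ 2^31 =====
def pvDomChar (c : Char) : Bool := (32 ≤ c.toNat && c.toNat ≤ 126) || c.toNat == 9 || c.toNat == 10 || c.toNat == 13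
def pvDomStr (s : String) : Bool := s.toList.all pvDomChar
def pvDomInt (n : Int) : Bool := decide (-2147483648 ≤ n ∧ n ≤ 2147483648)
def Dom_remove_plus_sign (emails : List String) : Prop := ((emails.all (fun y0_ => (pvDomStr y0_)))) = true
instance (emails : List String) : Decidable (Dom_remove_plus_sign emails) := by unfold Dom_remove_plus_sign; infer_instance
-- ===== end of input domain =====

-- B replaces A's two find-indices-and-slice steps with a single-pass three-state character
-- automaton per email (objective: alternative algorithm, same cost). A only reads its argument.

-- ===== PORT A =====
-- per-email body of A's for-loop: find both indices, then slice-and-concatenate or keep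
def pvAEmail (email : String) : String :=
  let plus_idx := PySem.Str.find email "+"
  let at_idx := PySem.Str.find email "@"
  if plus_idx ≠ -1 ∧ at_idx > plus_idx then
    String.ofList (PySem.Chars.slice email.toList (some 0) (some plus_idx) ++
                   PySem.Chars.slice email.toList (some at_idx) none)
  else email

def remove_plus_sign (emails : List String) : List String :=
  emails.foldl (fun new_emails email => new_emails ++ [pvAEmail email]) []

-- ===== PORT B =====
-- the automaton step: state 0 = copying (no '+' yet), 1 = skipping after a '+', 2 = past the '@'
def pvStep (st : Nat × List Char) (ch : Char) : Nat × List Char :=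
  if st.1 = 0 then
    if ch = '+' then (1, st.2)
    else if ch = '@' then (2, st.2 ++ [ch])
    else (0, st.2 ++ [ch])
  else if st.1 = 1 then
    if ch = '@' then (2, st.2 ++ [ch]) else (1, st.2)
  else (st.1, st.2 ++ [ch])

-- per-email body of B's for-loop: run the automaton; ending mid-skip keeps the original email
def pvBEmail (email : String) : String :=
  let r := email.toList.foldl pvStep (0, [])
  if r.1 = 1 then email else String.ofList r.2

def remove_plus_sign_alt (emails : List String) : List String :=
  emails.foldl (fun acc email => acc ++ [pvBEmail email]) []

-- ===== PRECONDITION & SPEC =====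
def Spec_remove_plus_sign (emails : List String) (out : List String) : Prop := out = remove_plus_sign_alt emails
instance (emails : List String) (out : List String) : Decidable (Spec_remove_plus_sign emails out) := by unfold Spec_remove_plus_sign; infer_instance

-- ===== CLAIM (what is proved, stated in full; the proofs are below) =====
def Claim_equal_remove_plus_sign : Prop := ∀ (emails : List String), Dom_remove_plus_sign emails → Spec_remove_plus_sign emails (remove_plus_sign emails)

-- ===== LEMMAS AND PROOFS =====

-- proof-only helper: split a character list at the first occurrence of c (none = absent)
def pvPartition (c : Char) : List Char → Option (List Char × List Char)
  | [] => none
  | x :: xs => if x = c then some ([], xs)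
               else (pvPartition c xs).map (fun p => (x :: p.1, p.2))

theorem pvPartition_none {c : Char} {cs : List Char} (h : pvPartition c cs = none) : c ∉ cs := by
  induction cs with
  | nil => simp
  | cons x xs ih =>
    by_cases hx : x = c
    · simp [pvPartition, hx] at h
    · simp [pvPartition, hx, Option.map_eq_none_iff] at h
      simp [Ne.symm hx, ih h]

theorem pvPartition_some {c : Char} {cs l r : List Char}
    (h : pvPartition c cs = some (l, r)) : cs = l ++ c :: r ∧ c ∉ l := by
  induction cs generalizing l r with
  | nil => simp [pvPartition] at h
  | cons x xs ih =>
    by_cases hx : x = c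
    · simp [pvPartition, hx] at h
      simp [h.1, h.2, hx]
    · rw [pvPartition] at h
      rw [if_neg hx, Option.map_eq_some_iff] at h
      obtain ⟨⟨l', r'⟩, hp, hlr⟩ := h
      obtain ⟨heq, hmem⟩ := ih hp
      obtain ⟨hl, hr⟩ := Prod.mk.injEq .. ▸ hlr
      subst hr
      cases hl
      simp [heq, Ne.symm hx, hmem]

theorem singleton_prefix_iff (c : Char) (xs : List Char) : [c] <+: xs ↔ xs[0]? = some c := by
  cases xs with
  | nil => simp
  | cons y ys => simp [List.cons_prefix_cons, eq_comm]

-- find of a single character: first index whose element is c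
theorem find_char_eq {cs : List Char} {c : Char} (k : Nat)
    (hk : cs[k]? = some c) (hlt : ∀ i < k, cs[i]? ≠ some c) :
    PySem.Chars.find cs [c] = (k : Int) := by
  have hmem : c ∈ cs := List.mem_of_getElem? hk
  have hinf : [c] <:+: cs := by
    obtain ⟨s, t, hst⟩ := List.append_of_mem hmem
    exact ⟨s, t, by simp [hst]⟩
  have hnn : 0 ≤ PySem.Chars.find cs [c] := (PySem.Chars.find_nonneg_iff cs [c]).2 hinf
  obtain ⟨hpre, hmin⟩ := PySem.Chars.find_spec hnn
  set n := (PySem.Chars.find cs [c]).toNat with hn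
  have hnc : cs[n]? = some c := by
    have := (singleton_prefix_iff c (cs.drop n)).1 (by simpa using hpre)
    simpa [List.getElem?_drop] using this
  have h1 : ¬ k < n := by
    intro hlt'
    exact hmin k hlt' ((singleton_prefix_iff c (cs.drop k)).2 (by simpa [List.getElem?_drop] using hk))
  have h2 : ¬ n < k := fun hlt' => hlt n hlt' hnc
  have : n = k := by omega
  omega

theorem find_char_neg {cs : List Char} {c : Char} (h : c ∉ cs) :
    PySem.Chars.find cs [c] = -1 := by
  rw [PySem.Chars.find_eq_neg_one_iff]
  intro ⟨s, t, hst⟩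
  exact h (by simp [← hst])

-- no element of l at an index < l.length (within cs = l ++ …) is c when c ∉ l
theorem getElem?_append_left_ne {l rest : List Char} {c : Char} (hnotin : c ∉ l) :
    ∀ i < l.length, (l ++ rest)[i]? ≠ some c := by
  intro i hi hc
  rw [List.getElem?_append_left hi] at hc
  exact hnotin (List.mem_of_getElem? hc)

-- automaton runs over special-character-free segments
theorem fold2 (cs : List Char) : ∀ acc, cs.foldl pvStep (2, acc) = (2, acc ++ cs) := by
  induction cs with
  | nil => simp
  | cons x xs ih => intro acc; simp [pvStep, ih]

theorem fold0 {cs : List Char} (hp : '+' ∉ cs) (ha : '@' ∉ cs) :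
    ∀ acc, cs.foldl pvStep (0, acc) = (0, acc ++ cs) := by
  induction cs with
  | nil => simp
  | cons x xs ih =>
    intro acc
    simp only [List.mem_cons, not_or] at hp ha
    rw [List.foldl_cons]
    have hst : pvStep (0, acc) x = (0, acc ++ [x]) := by
      simp [pvStep, Ne.symm hp.1, Ne.symm ha.1]
    rw [hst, ih hp.2 ha.2]
    simp

theorem fold1 {cs : List Char} (ha : '@' ∉ cs) :
    ∀ acc, cs.foldl pvStep (1, acc) = (1, acc) := by
  induction cs with
  | nil => simp
  | cons x xs ih =>
    intro acc
    simp only [List.mem_cons, not_or] at ha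
    rw [List.foldl_cons]
    have hst : pvStep (1, acc) x = (1, acc) := by simp [pvStep, Ne.symm ha.1]
    rw [hst, ih ha.2]

-- the per-email bodies agree on every string
theorem email_eq (email : String) : pvAEmail email = pvBEmail email := by
  have tplus : "+".toList = ['+'] := by decide
  have tat : "@".toList = ['@'] := by decide
  have eplus : PySem.Str.find email "+" = PySem.Chars.find email.toList ['+'] := by
    rw [PySem.Str.find_eq, tplus]
  have eat : PySem.Str.find email "@" = PySem.Chars.find email.toList ['@'] := by
    rw [PySem.Str.find_eq, tat]
  unfold pvAEmail pvBEmail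
  rw [eplus, eat]
  cases hP : pvPartition '+' email.toList with
  | none =>
    -- no '+': A keeps the email; B never enters state 1 and copies everything
    have hplus : '+' ∉ email.toList := pvPartition_none hP
    have hfp : PySem.Chars.find email.toList ['+'] = -1 := find_char_neg hplus
    have hneg : ¬(PySem.Chars.find email.toList ['+'] ≠ -1 ∧
        PySem.Chars.find email.toList ['@'] > PySem.Chars.find email.toList ['+']) := by
      rintro ⟨hne, _⟩; exact hne hfp
    rw [if_neg hneg]
    cases hA : pvPartition '@' email.toList with
    | none =>
      have hat : '@' ∉ email.toList := pvPartition_none hA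
      simp [fold0 hplus hat]
    | some p =>
      obtain ⟨q, r⟩ := p
      obtain ⟨hcs, hatq⟩ := pvPartition_some hA
      have hpq : '+' ∉ q := fun h => hplus (hcs ▸ List.mem_append_left _ h)
      rw [hcs, List.foldl_append, fold0 hpq hatq]
      simp [pvStep, fold2, ← hcs]
  | some p =>
    obtain ⟨pre, rest⟩ := p
    obtain ⟨hcs, hpre⟩ := pvPartition_some hP
    have hfp : PySem.Chars.find email.toList ['+'] = (pre.length : Int) := by
      rw [hcs]; exact find_char_eq pre.length (by simp) (getElem?_append_left_ne hpre)
    cases hA : pvPartition '@' pre with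
    | some q =>
      -- '@' occurs before the first '+': A keeps the email; B reaches state 2 inside pre
      obtain ⟨q1, q2⟩ := q
      obtain ⟨hpq, hq1⟩ := pvPartition_some hA
      have hfa : PySem.Chars.find email.toList ['@'] = (q1.length : Int) := by
        rw [hcs, hpq]
        have : (q1 ++ '@' :: q2) ++ '+' :: rest = q1 ++ '@' :: (q2 ++ '+' :: rest) := by simp
        rw [this]
        exact find_char_eq q1.length (by simp) (getElem?_append_left_ne hq1)
      have hlen : q1.length < pre.length := by rw [hpq]; simp
      have hneg : ¬(PySem.Chars.find email.toList ['+'] ≠ -1 ∧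
          PySem.Chars.find email.toList ['@'] > PySem.Chars.find email.toList ['+']) := by
        rintro ⟨_, hgt⟩; rw [hfa, hfp] at hgt; exact_mod_cast absurd hgt (by omega)
      rw [if_neg hneg]
      have hp1 : '+' ∉ q1 := fun h => hpre (hpq ▸ List.mem_append_left _ h)
      have hstep : email.toList.foldl pvStep (0, []) = (2, email.toList) := by
        rw [hcs, hpq]
        have : (q1 ++ '@' :: q2) ++ '+' :: rest = q1 ++ '@' :: (q2 ++ '+' :: rest) := by simp
        rw [this, List.foldl_append, fold0 hp1 hq1]
        simp [pvStep, fold2, ← this, ← hpq]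
      simp [hstep]
    | none =>
      -- first special char is '+': B enters state 1 after pre
      have hapre : '@' ∉ pre := pvPartition_none hA
      have hstep1 : email.toList.foldl pvStep (0, []) = ('+' :: rest).foldl pvStep (0, pre) := by
        rw [hcs, List.foldl_append, fold0 hpre hapre]; simp
      cases hR : pvPartition '@' rest with
      | none =>
        -- no '@' after the '+': A keeps the email (at_idx = -1); B ends in state 1
        have harest : '@' ∉ rest := pvPartition_none hR
        have hat : '@' ∉ email.toList := by
          rw [hcs]; simp [hapre, harest]
        have hfa : PySem.Chars.find email.toList ['@'] = -1 := find_char_neg hat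
        have hneg : ¬(PySem.Chars.find email.toList ['+'] ≠ -1 ∧
            PySem.Chars.find email.toList ['@'] > PySem.Chars.find email.toList ['+']) := by
          rintro ⟨_, hgt⟩
          rw [hfa, hfp] at hgt
          have : (0:Int) ≤ pre.length := by positivity
          omega
        rw [if_neg hneg]
        rw [hstep1]
        simp [pvStep, fold1 harest]
      | some m =>
        -- '+' then '@': A slices; B skips mid, copies '@' and the tail
        obtain ⟨mid, tail⟩ := m
        obtain ⟨hrest, hmid⟩ := pvPartition_some hR
        have hcs' : email.toList = pre ++ '+' :: (mid ++ '@' :: tail) := by rw [hcs, hrest]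
        have hfa : PySem.Chars.find email.toList ['@'] = ((pre.length + 1 + mid.length : Nat) : Int) := by
          have hform : email.toList = (pre ++ '+' :: mid) ++ '@' :: tail := by
            rw [hcs']; simp
          rw [hform]
          have hna : '@' ∉ pre ++ '+' :: mid := by simp [hapre, hmid]
          have hlen : (pre ++ '+' :: mid).length = pre.length + 1 + mid.length := by
            simp; omega
          rw [← hlen]
          exact find_char_eq _ (by simp) (getElem?_append_left_ne hna)
        have hpos : PySem.Chars.find email.toList ['+'] ≠ -1 ∧
            PySem.Chars.find email.toList ['@'] > PySem.Chars.find email.toList ['+'] := by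
          rw [hfp, hfa]
          constructor
          · intro h; omega
          · exact_mod_cast by omega
        rw [if_pos hpos, hfp, hfa]
        -- A's slices
        rw [PySem.Chars.slice_eq_listSlice, PySem.Chars.slice_eq_listSlice,
            PySem.List.slice_zero_start, PySem.List.slice_to_natCast,
            PySem.List.slice_from_natCast]
        have htake : List.take pre.length email.toList = pre := by
          rw [hcs']; exact List.take_left
        have hdrop : List.drop (pre.length + 1 + mid.length) email.toList = '@' :: tail := by
          have hform : email.toList = (pre ++ '+' :: mid) ++ '@' :: tail := by
            rw [hcs']; simp
          rw [hform]
          have : (pre ++ '+' :: mid).length = pre.length + 1 + mid.length := by simp; omega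
          rw [← this]; exact List.drop_left
        rw [htake, hdrop]
        -- B's automaton run
        have hstep2 : email.toList.foldl pvStep (0, []) = (2, pre ++ '@' :: tail) := by
          rw [hstep1]
          simp only [List.foldl_cons]
          have s1 : pvStep (0, pre) '+' = (1, pre) := by simp [pvStep]
          rw [s1, hrest]
          have : mid ++ '@' :: tail = mid ++ ['@'] ++ tail := by simp
          rw [this, List.foldl_append, List.foldl_append, fold1 hmid]
          have s2 : List.foldl pvStep (1, pre) ['@'] = (2, pre ++ ['@']) := by simp [pvStep]
          rw [s2, fold2]
          simp
        simp [hstep2]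

-- ===== VERDICT (by name: the statement is the Claim_ definition above) =====
theorem remove_plus_sign_spec : Claim_equal_remove_plus_sign := by
  intro emails _
  unfold Spec_remove_plus_sign remove_plus_sign remove_plus_sign_alt
  rw [PySem.List.foldl_append_singleton_eq_map, PySem.List.foldl_append_singleton_eq_map]
  simp [List.map_congr_left (fun e _ => email_eq e)]
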